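-- pv_equiv track=rewrite | github.com/kajigor/fl-2021-hse-win | solution/parser/main.py | get_return_value
-- ===== SOURCE A (Python) =====
-- def index_checking(s, index, arr):
--     if len(s) <= index:
--         return False
--     for i in arr:
--         if s[index] == i:
--             return False
--     return True
--
-- def char_checking(ch):
--     if ch == '>':
--         return "&gt;"
--     if ch == '<':
--         return "&lt;"
--     if ch == '&':
--         return "&amp;"
--     if ch != ' ':
--         return ch
--     return ''
--
-- def get_return_value(s):
--     result = ""
--     index = 0
--     while index_checking(s, index, {' '}):
--         index += 1
--     while index_checking(s, index, {';'}):
--         result += char_checking(s[index])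
--         index += 1
--     return result
-- ===== SOURCE B (Python) =====
-- def get_return_value(s):
--     i = s.find(' ')
--     if i == -1:
--         return ''
--     seg = s[i:]
--     j = seg.find(';')
--     if j != -1:
--         seg = seg[:j]
--     mapping = {'>': '&gt;', '<': '&lt;', '&': '&amp;', ' ': ''}
--     return ''.join(mapping.get(c, c) for c in seg)
-- ===== Notes on version B (the rewrite author's own statement) =====
-- stated objective: simpler
-- what changed: Replaces the two index-predicate while loops (with the index_checking helper re-scanning a set each step) by boundary computation via str.find plus slicing, then a single join over a mapping dict.
import Mathlib
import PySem

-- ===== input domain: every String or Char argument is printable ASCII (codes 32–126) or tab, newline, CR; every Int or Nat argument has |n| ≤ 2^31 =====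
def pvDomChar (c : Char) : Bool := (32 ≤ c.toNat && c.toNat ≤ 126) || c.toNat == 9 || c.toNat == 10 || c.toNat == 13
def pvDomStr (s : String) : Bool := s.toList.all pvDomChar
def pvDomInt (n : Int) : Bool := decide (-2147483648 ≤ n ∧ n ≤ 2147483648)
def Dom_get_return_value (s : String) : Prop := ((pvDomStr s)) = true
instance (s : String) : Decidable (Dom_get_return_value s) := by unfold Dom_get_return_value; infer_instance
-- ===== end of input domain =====

-- B replaces A's two index-predicate while loops by find/slice boundary computation and one
-- join over a mapping dict (objective: simpler). Both compute the same return value; no side effects.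

-- ===== PORT A =====
-- Python's `for i in arr: if s[index] == i: return False / return True` is `arr.any` negated;
-- inside A's loops index < len(s) holds whenever s[index] is read, so getD's default is never used.
def index_checking (s : List Char) (index : Nat) (arr : List Char) : Bool :=
  if s.length ≤ index then false
  else if arr.any (fun i => s.getD index ' ' == i) then false
  else true

def char_checking (ch : Char) : List Char :=
  if ch == '>' then "&gt;".toList
  else if ch == '<' then "&lt;".toList
  else if ch == '&' then "&amp;".toList
  else if ch != ' ' then [ch]
  else []

-- first while loop of A
def skip_loop (s : List Char) (index : Nat) : Nat :=
  if h : index_checking s index [' '] then skip_loop s (index + 1) else index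
termination_by s.length - index
decreasing_by
  simp only [index_checking] at h
  split at h
  · simp at h
  · omega

-- second while loop of A (result accumulated as List Char, returned as String at the end)
def build_loop (s : List Char) (index : Nat) (result : List Char) : List Char :=
  if h : index_checking s index [';'] then
    build_loop s (index + 1) (result ++ char_checking (s.getD index ' '))
  else result
termination_by s.length - index
decreasing_by
  simp only [index_checking] at h
  split at h
  · simp at h
  · omega

def get_return_value (s : String) : String :=
  String.ofList (build_loop s.toList (skip_loop s.toList 0) [])

-- ===== PORT B =====
def bMapping : PySem.Dict Char (List Char) :=
  ((((PySem.Dict.empty).insert '>' "&gt;".toList).insert '<' "&lt;".toList).insert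
      '&' "&amp;".toList).insert ' ' []

def get_return_value_alt (s : String) : String :=
  let i := PySem.Str.find s " "
  if i == -1 then ""
  else
    let seg := PySem.Chars.slice s.toList (some i) none
    let j := PySem.Chars.find seg ";".toList
    let seg := if j != -1 then PySem.Chars.slice seg none (some j) else seg
    String.ofList (PySem.Chars.join [] (seg.map (fun c => (bMapping.get? c).getD [c])))

-- ===== PRECONDITION & SPEC =====
def Spec_get_return_value (s : String) (out : String) : Prop := out = get_return_value_alt s
instance (s : String) (out : String) : Decidable (Spec_get_return_value s out) := by unfold Spec_get_return_value; infer_instance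

-- ===== CLAIM (what is proved, stated in full; the proofs are below) =====
def Claim_equal_get_return_value : Prop := ∀ (s : String), Dom_get_return_value s → Spec_get_return_value s (get_return_value s)

-- ===== LEMMAS AND PROOFS =====

theorem index_checking_singleton (s : List Char) (i : Nat) (c : Char) :
    index_checking s i [c] = true ↔ i < s.length ∧ ¬ s.getD i ' ' = c := by
  simp only [index_checking]
  split <;> rename_i h1
  · simp; omega
  · split <;> rename_i h2 <;> simp_all

theorem skip_spec (s : List Char) (i : Nat) :
    skip_loop s i = i + List.findIdx (fun a => a == ' ') (s.drop i) := by
  unfold skip_loop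
  split <;> rename_i h <;> rw [index_checking_singleton] at h
  · obtain ⟨hlt, hne⟩ := h
    rw [List.getD_eq_getElem?_getD, List.getElem?_eq_getElem hlt, Option.getD_some] at hne
    rw [skip_spec s (i + 1), List.drop_eq_getElem_cons hlt, List.findIdx_cons]
    have hb : (s[i] == ' ') = false := by simp [hne]
    rw [hb]
    simp only [cond_false]
    omega
  · by_cases hlt : i < s.length
    · have hsp : s.getD i ' ' = ' ' := by
        by_contra hn
        exact h ⟨hlt, hn⟩
      rw [List.getD_eq_getElem?_getD, List.getElem?_eq_getElem hlt, Option.getD_some] at hsp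
      rw [List.drop_eq_getElem_cons hlt, List.findIdx_cons]
      have hb : (s[i] == ' ') = true := by simp [hsp]
      rw [hb]
      simp
    · rw [List.drop_eq_nil_of_le (by omega)]
      simp
termination_by s.length - i
decreasing_by omega

theorem build_spec (s : List Char) (i : Nat) (res : List Char) :
    build_loop s i res =
      res ++ (List.takeWhile (fun a => a != ';') (s.drop i)).flatMap char_checking := by
  unfold build_loop
  split <;> rename_i h <;> rw [index_checking_singleton] at h
  · obtain ⟨hlt, hne⟩ := h
    rw [List.getD_eq_getElem?_getD, List.getElem?_eq_getElem hlt, Option.getD_some] at hne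
    rw [build_spec s (i + 1), List.drop_eq_getElem_cons hlt,
      List.getD_eq_getElem?_getD, List.getElem?_eq_getElem hlt, Option.getD_some]
    have hb : (s[i] != ';') = true := by simp [hne]
    simp only [List.takeWhile_cons, hb, if_true, List.flatMap_cons, List.append_assoc]
  · by_cases hlt : i < s.length
    · have hsc : s.getD i ' ' = ';' := by
        by_contra hn
        exact h ⟨hlt, hn⟩
      rw [List.getD_eq_getElem?_getD, List.getElem?_eq_getElem hlt, Option.getD_some] at hsc
      rw [List.drop_eq_getElem_cons hlt, List.takeWhile_cons]
      simp [hsc]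
    · rw [List.drop_eq_nil_of_le (by omega)]
      simp
termination_by s.length - i
decreasing_by omega

theorem singleton_infix_iff_mem (c : Char) (l : List Char) : [c] <:+: l ↔ c ∈ l := by
  constructor
  · intro h
    exact (List.singleton_sublist).1 h.sublist
  · intro h
    obtain ⟨u, v, rfl⟩ := List.append_of_mem h
    exact ⟨u, v, by simp⟩

theorem singleton_prefix_iff (c : Char) (l : List Char) : [c] <+: l ↔ l.head? = some c := by
  cases l with
  | nil => simp
  | cons a t =>
    constructor
    · intro h
      obtain ⟨hd, _⟩ := (List.cons_prefix_cons).1 h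
      simp [hd]
    · intro h
      simp only [List.head?_cons, Option.some.injEq] at h
      exact (List.cons_prefix_cons).2 ⟨h.symm, List.nil_prefix⟩

theorem find_singleton_not_mem {c : Char} {l : List Char} (h : c ∉ l) :
    PySem.Chars.find l [c] = -1 := by
  rw [PySem.Chars.find_eq_neg_one_iff, singleton_infix_iff_mem]
  exact h

theorem find_singleton_mem {c : Char} {l : List Char} (h : c ∈ l) :
    PySem.Chars.find l [c] = (List.findIdx (fun a => a == c) l : Int) := by
  have h0 : 0 ≤ PySem.Chars.find l [c] :=
    (PySem.Chars.find_nonneg_iff l [c]).2 ((singleton_infix_iff_mem c l).2 h)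
  obtain ⟨hpre, hmin⟩ := PySem.Chars.find_spec h0
  set n := (PySem.Chars.find l [c]).toNat with hn
  have hget : l[n]? = some c := by
    rw [← List.head?_drop]
    exact (singleton_prefix_iff c (l.drop n)).1 hpre
  have hlt : n < l.length := by
    by_contra hge
    rw [List.getElem?_eq_none (by omega)] at hget
    simp at hget
  rw [List.getElem?_eq_getElem hlt] at hget
  have hgc : l[n] = c := Option.some.inj hget
  have hidx : List.findIdx (fun a => a == c) l = n := by
    rw [List.findIdx_eq hlt]
    constructor
    · simp [hgc]
    · intro j hj
      have hnp : ¬ [c] <+: l.drop j := hmin j hj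
      rw [singleton_prefix_iff, List.head?_drop] at hnp
      have hjlt : j < l.length := by omega
      rw [List.getElem?_eq_getElem hjlt] at hnp
      simp only [Option.some.injEq] at hnp
      simp [hnp]
  rw [hidx]
  omega

theorem take_findIdx_eq_takeWhile (c : Char) (l : List Char) :
    l.take (List.findIdx (fun a => a == c) l) = l.takeWhile (fun a => a != c) := by
  induction l with
  | nil => simp
  | cons a t ih =>
    by_cases hac : a = c
    · simp [List.findIdx_cons, hac]
    · have hb : (a == c) = false := by simp [hac]
      rw [List.findIdx_cons, hb]
      simp only [cond_false, List.take_succ_cons, List.takeWhile_cons]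
      rw [ih]
      simp [hac]

theorem join_nil_eq_flatten (parts : List (List Char)) :
    PySem.Chars.join [] parts = parts.flatten := by
  induction parts with
  | nil => simp [PySem.Chars.join_nil]
  | cons p rest ih =>
    cases rest with
    | nil => simp [PySem.Chars.join_singleton]
    | cons q r =>
      rw [PySem.Chars.join_cons_cons]
      simp only [List.flatten_cons, List.append_nil]
      rw [ih]
      simp

theorem mapping_eq_char_checking :
    (fun c => (bMapping.get? c).getD [c]) = char_checking := by
  funext c
  by_cases h1 : c = ' '
  · simp [h1, bMapping, PySem.Dict.get?_insert_self, char_checking]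
  by_cases h2 : c = '&'
  · rw [h2]
    simp only [bMapping]
    rw [PySem.Dict.get?_insert_of_ne _ _ (by decide), PySem.Dict.get?_insert_self]
    simp [char_checking]
  by_cases h3 : c = '<'
  · rw [h3]
    simp only [bMapping]
    rw [PySem.Dict.get?_insert_of_ne _ _ (by decide),
      PySem.Dict.get?_insert_of_ne _ _ (by decide), PySem.Dict.get?_insert_self]
    simp [char_checking]
  by_cases h4 : c = '>'
  · rw [h4]
    simp only [bMapping]
    rw [PySem.Dict.get?_insert_of_ne _ _ (by decide),
      PySem.Dict.get?_insert_of_ne _ _ (by decide),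
      PySem.Dict.get?_insert_of_ne _ _ (by decide), PySem.Dict.get?_insert_self]
    simp [char_checking]
  · simp only [bMapping]
    rw [PySem.Dict.get?_insert_of_ne _ _ h1, PySem.Dict.get?_insert_of_ne _ _ h2,
      PySem.Dict.get?_insert_of_ne _ _ h3, PySem.Dict.get?_insert_of_ne _ _ h4]
    simp [PySem.Dict.empty, PySem.Dict.get?, char_checking, h1, h2, h3, h4]

-- ===== VERDICT (by name: the statement is the Claim_ definition above) =====
theorem get_return_value_spec : Claim_equal_get_return_value := by
  unfold Claim_equal_get_return_value
  intro s _
  unfold Spec_get_return_value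
  unfold get_return_value get_return_value_alt
  rw [build_spec, skip_spec]
  simp only [Nat.zero_add, List.drop_zero, PySem.Str.find_eq]
  have hsp : " ".toList = [' '] := rfl
  have hsc : ";".toList = [';'] := rfl
  rw [hsp, hsc]
  set l := s.toList with hl
  by_cases hmem : ' ' ∈ l
  · rw [find_singleton_mem hmem]
    set k := List.findIdx (fun a => a == ' ') l with hk
    have hklen : k < l.length := List.findIdx_lt_length.2 ⟨' ', hmem, by simp⟩
    have hne : ((k : Int) == -1) = false := by simp
    simp only [hne, Bool.false_eq_true, if_false]
    rw [PySem.Chars.slice_eq_listSlice, PySem.List.slice_from _ (by positivity), Int.toNat_natCast]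
    set seg := l.drop k with hseg
    rw [mapping_eq_char_checking, join_nil_eq_flatten, ← List.flatMap_def]
    by_cases hsem : ';' ∈ seg
    · rw [find_singleton_mem hsem]
      have hne2 : (((List.findIdx (fun a => a == ';') seg : Int)) != -1) = true := by simp
      simp only [hne2, if_true]
      rw [PySem.Chars.slice_eq_listSlice, PySem.List.slice_to _ (by positivity),
        Int.toNat_natCast, take_findIdx_eq_takeWhile]
      simp
    · rw [find_singleton_not_mem hsem]
      simp only [bne_self_eq_false, Bool.false_eq_true, if_false]
      rw [List.takeWhile_eq_self_iff.2 (by intro x hx; simp; rintro rfl; exact hsem hx)]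
      simp
  · rw [find_singleton_not_mem hmem]
    simp only [beq_self_eq_true, if_true]
    have hk : List.findIdx (fun a => a == ' ') l = l.length :=
      List.findIdx_eq_length.2 (by intro x hx; simp; rintro rfl; exact hmem hx)
    rw [hk, List.drop_length]
    simp only [List.takeWhile_nil, List.flatMap_nil, List.append_nil]
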